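-- pv_equiv track=rewrite | github.com/MatthewFoster02/3-1-APG-Digital-Exit-Strategy | src/main/tf_idf/td_idf_file.py | clean_documents
-- ===== SOURCE A (Python) =====
-- import string
--
-- def clean_documents(corpus, words_to_remove, dutch):
--     for i in range(len(corpus)):
--         # In order to work with the corpus, we first need to convert it to a string.
--         document = str(corpus[i])
--
--         # Replacing characters on which emphasis was placed. This helps avoiding the word 'maar' to appear both as
--         # 'maar' and as 'máár' in the final cleaned corpus.
--         document = document.replace("á", "a").replace("é", "e").replace("è", "e").replace("ó", "o").replace("ò",
--                                                                                                             "o").replace(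
--             "í", "i")
--
--         # Splitting our 'document' into a list of words, meaning we can now look at each word individually and
--         # initializing a new variable 'clean_document' to which we can store all the words we want to retain.
--         words = document.split()
--         cleaned_document = []
--
--         # First, we start by removing every word in the list that appears in the 'words_to_remove' list and each word
--         # that either contains or entirely consists of some unexpected characters (such as 'xD' here which is inserted
--         # by Python when a tab is read from the original scrape results. This removal is done by simply not adding them
--         # to the 'cleaned_document' variable.
--         for word in words:
--             word = word.lower()
--             if word[-2:] == "xD":
--                 word = word[:-2]
--             cleaned_document.append(word)
--
--         # Now we can join all these words into a list and remove punctuation, numbers and double spaces.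
--         cleaned_document = " ".join(cleaned_document)
--         cleaned_document = cleaned_document.translate(str.maketrans("", "", (string.punctuation + "’")))
--         cleaned_document = "".join([i for i in cleaned_document if not i.isdigit()])
--         while "  " in cleaned_document:
--             cleaned_document = cleaned_document.replace("  ", " ")
--
--         # Splitting our 'cleaned_document' into a list of words, meaning we can now look at each word individually and
--         # initializing a new variable 'stemmed_document' to which we can store all the words we want to retain.
--         words = cleaned_document.split()
--         stemmed_document = []
--
--         # First, we check whether the current word does not appear in the 'words_to_remove' list and then we check whether we
--         # can stem it.
--         for word in words:
--             if word not in words_to_remove: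
--                 if dutch:
--                     if "ing" in word and word.replace('ing', '') in words:
--                         stemmed_document.append(word.replace('ing', ''))
--                     elif "s" in word and word.replace('s', '') in words:
--                         stemmed_document.append(word.replace('s', ''))
--                     elif "ig" in word and word.replace('ig', '') in words:
--                         stemmed_document.append(word.replace('ig', ''))
--                     elif "isme" in word and word.replace('isme', '') in words:
--                         stemmed_document.append(word.replace('isme', ''))
--                     elif "lijk" in word and word.replace('lijk', '') in words:
--                         stemmed_document.append(word.replace('lijk', ''))
--                     else:
--                         stemmed_document.append(word)
--                 elif not dutch:
--                     if "s" in word and word.replace('s', '') in words: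
--                         stemmed_document.append(word.replace('s', ''))
--                     elif "ism" in word and word.replace('ism', '') in words:
--                         stemmed_document.append(word.replace('ism', ''))
--                     elif "ed" in word and word.replace('ed', '') in words:
--                         stemmed_document.append(word.replace('ed', ''))
--                     elif "al" in word and word.replace('al', '') in words:
--                         stemmed_document.append(word.replace('al', ''))
--                     elif "ist" in word and word.replace('ist', '') in words:
--                         stemmed_document.append(word.replace('ist', ''))
--                     elif "ity" in word and word.replace('ity', '') in words:
--                         stemmed_document.append(word.replace('ity', ''))
--                     elif "ness" in word and word.replace('ness', '') in words:
--                         stemmed_document.append(word.replace('ness', ''))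
--                     else:
--                         stemmed_document.append(word)
--
--         stemmed_document = " ".join(stemmed_document)
--         corpus[i] = stemmed_document
--     return corpus
-- ===== SOURCE B (Python) =====
-- import string
--
-- DROP = string.punctuation + "\u2019"
-- DUTCH_SUFFIXES = ['ing', 's', 'ig', 'isme', 'lijk']
-- ENGLISH_SUFFIXES = ['s', 'ism', 'ed', 'al', 'ist', 'ity', 'ness']
--
-- def clean_documents(corpus, words_to_remove, dutch):
--     suffixes = DUTCH_SUFFIXES if dutch else ENGLISH_SUFFIXES
--     for i in range(len(corpus)):
--         document = str(corpus[i])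
--         document = document.replace("á", "a").replace("é", "e").replace("è", "e") \
--                            .replace("ó", "o").replace("ò", "o").replace("í", "i")
--         # clean each token in one pass: lowercase, drop punctuation and digits,
--         # keep only the nonempty results
--         words = [w for w in
--                  ("".join(c for c in token.lower() if c not in DROP and not c.isdigit())
--                   for token in document.split())
--                  if w]
--         stemmed = []
--         for word in words:
--             if word in words_to_remove:
--                 continue
--             for suf in suffixes:
--                 stem = word.replace(suf, '')
--                 if suf in word and stem in words:
--                     stemmed.append(stem)
--                     break
--             else:
--                 stemmed.append(word)
--         corpus[i] = " ".join(stemmed)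
--     return corpus
-- ===== Notes on version B (the rewrite author's own statement) =====
-- stated objective: simpler
-- what changed: B cleans each token in a single per-token pass (lowercase + drop punctuation/digits, keep nonempty) instead of A's join/translate/digit-scan/quadratic double-space-collapse-loop/re-split pipeline, replaces the two duplicated elif cascades by one table-driven first-match suffix loop, and drops A's dead xD-suffix branch (the word is already lowercased, so word[-2:] can never be 'xD').
import Mathlib
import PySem

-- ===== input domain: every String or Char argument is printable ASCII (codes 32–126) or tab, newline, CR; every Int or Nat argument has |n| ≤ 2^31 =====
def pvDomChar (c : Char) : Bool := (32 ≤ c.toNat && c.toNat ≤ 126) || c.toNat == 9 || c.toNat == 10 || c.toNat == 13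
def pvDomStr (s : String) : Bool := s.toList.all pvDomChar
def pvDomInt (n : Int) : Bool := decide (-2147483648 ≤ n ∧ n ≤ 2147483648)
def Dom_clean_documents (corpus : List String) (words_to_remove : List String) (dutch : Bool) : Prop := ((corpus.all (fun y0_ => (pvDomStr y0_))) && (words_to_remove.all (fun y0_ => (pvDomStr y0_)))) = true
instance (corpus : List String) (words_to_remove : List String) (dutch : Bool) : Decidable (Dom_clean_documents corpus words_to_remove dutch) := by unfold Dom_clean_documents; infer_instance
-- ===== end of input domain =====

-- B (simpler): cleans each token in one pass (lowercase + drop punctuation/digits, keep nonempty)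
-- instead of A's join/translate/digit-scan/space-collapse-loop/resplit, and replaces the two elif
-- cascades by one table-driven first-match loop; B also drops A's dead "xD"-suffix branch (the word
-- is already lowercased, so it can never end in "xD").  A mutates `corpus` in place and returns it;
-- the equivalence proved here is about the RETURN value (both ports rebuild the list).

-- ===== PORT A =====
-- string.punctuation + "’"
def pvPunct : List Char := "!\"#$%&'()*+,-./:;<=>?@[\\]^_`{|}~’".toList

-- the chain of accent .replace calls
def pvAccents (s : List Char) : List Char :=
  PySem.Chars.replace (PySem.Chars.replace (PySem.Chars.replace (PySem.Chars.replace
    (PySem.Chars.replace (PySem.Chars.replace s ['á'] ['a']) ['é'] ['e']) ['è'] ['e'])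
    ['ó'] ['o']) ['ò'] ['o']) ['í'] ['i']

-- proof-side model of one `replace s "  " " "` pass; stated here only because pvCollapse's
-- termination proof cites pvReplace_len_lt by name
def pvRS (l : List Char) : List Char :=
  match l with
  | [] => []
  | c :: t => if [' ', ' '].isPrefixOf (c :: t) then ' ' :: pvRS (t.drop 1) else c :: pvRS t
termination_by l.length
decreasing_by all_goals (simp only [List.length_drop, List.length_cons]; omega)

theorem pvGoR_spec (fuel : Nat) : ∀ (l acc : List Char), l.length ≤ fuel →
    PySem.Chars.replace.go [' ', ' '] [' '] fuel l acc = acc.reverse ++ pvRS l := by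
  induction fuel with
  | zero =>
    intro l acc h
    have : l = [] := List.eq_nil_of_length_eq_zero (by omega)
    subst this
    simp [PySem.Chars.replace.go, pvRS]
  | succ n ih =>
    intro l acc h
    cases l with
    | nil => simp [PySem.Chars.replace.go, pvRS]
    | cons c t =>
      by_cases hp : [' ', ' '].isPrefixOf (c :: t) = true
      · rw [show PySem.Chars.replace.go [' ', ' '] [' '] (n+1) (c :: t) acc =
            PySem.Chars.replace.go [' ', ' '] [' '] n (List.drop 2 (c :: t)) ([' '].reverse ++ acc) by
          simp [PySem.Chars.replace.go, hp]]
        rw [ih _ _ (by simp at h ⊢; omega)]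
        rw [pvRS, if_pos hp]
        simp
      · rw [show PySem.Chars.replace.go [' ', ' '] [' '] (n+1) (c :: t) acc =
            PySem.Chars.replace.go [' ', ' '] [' '] n t (c :: acc) by
          simp [PySem.Chars.replace.go, hp]]
        rw [ih _ _ (by simp at h; omega)]
        rw [pvRS, if_neg hp]
        simp

theorem pvReplace_eq_pvRS (s : List Char) :
    PySem.Chars.replace s [' ', ' '] [' '] = pvRS s := by
  rw [PySem.Chars.replace]
  simp only [List.isEmpty_cons]
  rw [pvGoR_spec s.length s [] le_rfl]
  simp

theorem pvRS_len_le (l : List Char) : (pvRS l).length ≤ l.length := by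
  induction l using pvRS.induct with
  | case1 => simp [pvRS]
  | case2 c t hp ih =>
    rw [pvRS, if_pos hp]
    simp only [List.length_cons]
    have := List.length_drop (l := t) (i := 1)
    omega
  | case3 c t hp ih =>
    rw [pvRS, if_neg hp]
    simp only [List.length_cons]
    omega

theorem pvRS_len_lt (l : List Char) (h : [' ', ' '] <:+: l) : (pvRS l).length < l.length := by
  induction l using pvRS.induct with
  | case1 => simp at h
  | case2 c t hp ih =>
    rw [pvRS, if_pos hp]
    have hpre : [' ', ' '] <+: (c :: t) := by rwa [← List.isPrefixOf_iff_prefix]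
    obtain ⟨t'', ht⟩ := hpre
    have hh : ' ' :: (' ' :: t'') = c :: t := ht
    injection hh with h1 h2
    subst h2
    simp only [List.drop_succ_cons, List.drop_zero, List.length_cons]
    have := pvRS_len_le t''
    omega
  | case3 c t hp ih =>
    rw [pvRS, if_neg hp]
    simp only [List.length_cons]
    have ht : [' ', ' '] <:+: t := by
      rcases h with ⟨a, b, hab⟩
      cases a with
      | nil =>
        exfalso
        apply hp
        rw [List.isPrefixOf_iff_prefix]
        exact ⟨b, by simpa using hab⟩
      | cons x a' =>
        exact ⟨a', b, by simpa using congrArg List.tail hab⟩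
    have := ih ht
    omega

theorem pvReplace_len_lt (s : List Char) (h : PySem.Chars.isIn [' ', ' '] s = true) :
    (PySem.Chars.replace s [' ', ' '] [' ']).length < s.length := by
  rw [pvReplace_eq_pvRS]
  exact pvRS_len_lt s ((PySem.Chars.isIn_iff_infix _ _).mp h)

-- the `while "  " in cleaned_document: cleaned_document = cleaned_document.replace("  ", " ")` loop
def pvCollapse (s : List Char) : List Char :=
  if h : PySem.Chars.isIn [' ', ' '] s = true then
    pvCollapse (PySem.Chars.replace s [' ', ' '] [' '])
  else s
termination_by s.length
decreasing_by exact pvReplace_len_lt s h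

-- the dutch elif cascade
def pvStemDutch (allw : List (List Char)) (w : List Char) : List Char :=
  if PySem.Chars.isIn ['i','n','g'] w && allw.contains (PySem.Chars.replace w ['i','n','g'] []) then PySem.Chars.replace w ['i','n','g'] []
  else if PySem.Chars.isIn ['s'] w && allw.contains (PySem.Chars.replace w ['s'] []) then PySem.Chars.replace w ['s'] []
  else if PySem.Chars.isIn ['i','g'] w && allw.contains (PySem.Chars.replace w ['i','g'] []) then PySem.Chars.replace w ['i','g'] []
  else if PySem.Chars.isIn ['i','s','m','e'] w && allw.contains (PySem.Chars.replace w ['i','s','m','e'] []) then PySem.Chars.replace w ['i','s','m','e'] []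
  else if PySem.Chars.isIn ['l','i','j','k'] w && allw.contains (PySem.Chars.replace w ['l','i','j','k'] []) then PySem.Chars.replace w ['l','i','j','k'] []
  else w

-- the english elif cascade
def pvStemEnglish (allw : List (List Char)) (w : List Char) : List Char :=
  if PySem.Chars.isIn ['s'] w && allw.contains (PySem.Chars.replace w ['s'] []) then PySem.Chars.replace w ['s'] []
  else if PySem.Chars.isIn ['i','s','m'] w && allw.contains (PySem.Chars.replace w ['i','s','m'] []) then PySem.Chars.replace w ['i','s','m'] []
  else if PySem.Chars.isIn ['e','d'] w && allw.contains (PySem.Chars.replace w ['e','d'] []) then PySem.Chars.replace w ['e','d'] []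
  else if PySem.Chars.isIn ['a','l'] w && allw.contains (PySem.Chars.replace w ['a','l'] []) then PySem.Chars.replace w ['a','l'] []
  else if PySem.Chars.isIn ['i','s','t'] w && allw.contains (PySem.Chars.replace w ['i','s','t'] []) then PySem.Chars.replace w ['i','s','t'] []
  else if PySem.Chars.isIn ['i','t','y'] w && allw.contains (PySem.Chars.replace w ['i','t','y'] []) then PySem.Chars.replace w ['i','t','y'] []
  else if PySem.Chars.isIn ['n','e','s','s'] w && allw.contains (PySem.Chars.replace w ['n','e','s','s'] []) then PySem.Chars.replace w ['n','e','s','s'] []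
  else w

-- the body of the outer `for i in range(len(corpus))` loop (str() on a str is the identity;
-- translate with a delete table is exactly a character filter)
def pvDocA (wtr : List (List Char)) (dutch : Bool) (doc : List Char) : List Char :=
  let d := pvAccents doc
  let words := PySem.Chars.split₀ d
  let cleaned := words.foldl (fun acc w =>
      acc ++ [let w' := PySem.Chars.lower w;
              if PySem.Chars.slice w' (some (-2)) none = ['x', 'D'] then
                PySem.Chars.slice w' none (some (-2))
              else w']) []
  let joined := PySem.Chars.join [' '] cleaned
  let nopunct := joined.filter (fun c => !(pvPunct.contains c))
  let nodigit := nopunct.filter (fun c => !(PySem.Chars.isdigit c))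
  let collapsed := pvCollapse nodigit
  let words2 := PySem.Chars.split₀ collapsed
  let stemmed := words2.foldl (fun acc w =>
      if wtr.contains w then acc
      else if dutch then acc ++ [pvStemDutch words2 w]
      else if !dutch then acc ++ [pvStemEnglish words2 w]
      else acc) []
  PySem.Chars.join [' '] stemmed

def clean_documents (corpus : List String) (words_to_remove : List String) (dutch : Bool) : List String :=
  corpus.map (fun s => String.ofList (pvDocA (words_to_remove.map String.toList) dutch s.toList))

-- ===== PORT B =====
def pvSufDutch : List (List Char) := [['i','n','g'], ['s'], ['i','g'], ['i','s','m','e'], ['l','i','j','k']]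
def pvSufEnglish : List (List Char) := [['s'], ['i','s','m'], ['e','d'], ['a','l'], ['i','s','t'], ['i','t','y'], ['n','e','s','s']]

-- one-pass token cleaning: lowercase, drop punctuation (DROP = pvPunct) and digits
def pvCleanToken (t : List Char) : List Char :=
  (PySem.Chars.lower t).filter (fun c => !(pvPunct.contains c) && !(PySem.Chars.isdigit c))

-- the `for suf in suffixes: … break / else:` loop
def pvFirstStem : List (List Char) → List (List Char) → List Char → List Char
  | [], _, w => w
  | suf :: rest, allw, w =>
      if PySem.Chars.isIn suf w && allw.contains (PySem.Chars.replace w suf []) then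
        PySem.Chars.replace w suf []
      else pvFirstStem rest allw w

def pvDocB (wtr : List (List Char)) (sufs : List (List Char)) (doc : List Char) : List Char :=
  let words := ((PySem.Chars.split₀ (pvAccents doc)).map pvCleanToken).filter (fun w => !w.isEmpty)
  PySem.Chars.join [' '] (words.foldl (fun acc w =>
    if wtr.contains w then acc else acc ++ [pvFirstStem sufs words w]) [])

def clean_documents_alt (corpus : List String) (words_to_remove : List String) (dutch : Bool) : List String :=
  corpus.map (fun s => String.ofList (pvDocB (words_to_remove.map String.toList)
    (if dutch then pvSufDutch else pvSufEnglish) s.toList))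

-- ===== PRECONDITION & SPEC =====
def Spec_clean_documents (corpus : List String) (words_to_remove : List String) (dutch : Bool) (out : List String) : Prop := out = clean_documents_alt corpus words_to_remove dutch
instance (corpus : List String) (words_to_remove : List String) (dutch : Bool) (out : List String) : Decidable (Spec_clean_documents corpus words_to_remove dutch out) := by unfold Spec_clean_documents; infer_instance

-- ===== CLAIM (what is proved, stated in full; the proofs are below) =====
def Claim_equal_clean_documents : Prop := ∀ (corpus : List String) (words_to_remove : List String) (dutch : Bool), Dom_clean_documents corpus words_to_remove dutch → Spec_clean_documents corpus words_to_remove dutch (clean_documents corpus words_to_remove dutch)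

-- ===== LEMMAS AND PROOFS =====

theorem charLe (c d : Char) : (c ≤ d) ↔ c.toNat ≤ d.toNat := by
  rw [Char.le_def, UInt32.le_iff_toNat_le]; rfl

theorem pvUpper_range (c : Char) (h : PySem.Chars.isupper c = true) :
    65 ≤ c.toNat ∧ c.toNat ≤ 90 := by
  simp only [PySem.Chars.isupper, Bool.and_eq_true, decide_eq_true_eq, charLe] at h
  exact h

theorem pvLowerChar_toNat (c : Char) (h : PySem.Chars.isupper c = true) :
    (PySem.Chars.lowerChar c).toNat = c.toNat + 32 := by
  have hr := pvUpper_range c h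
  unfold PySem.Chars.lowerChar
  rw [if_pos h, Char.toNat_ofNat, if_pos (Or.inl (by omega))]

-- `word.lower()` never contains 'D', so A's `word[-2:] == "xD"` branch is dead
theorem pvLowerChar_ne_D (c : Char) : PySem.Chars.lowerChar c ≠ 'D' := by
  intro he
  by_cases h : PySem.Chars.isupper c = true
  · have hr := pvUpper_range c h
    have := pvLowerChar_toNat c h
    rw [he] at this
    have hD : 'D'.toNat = 68 := rfl
    omega
  · rw [PySem.Chars.lowerChar, if_neg h] at he
    subst he
    simp [PySem.Chars.isupper] at h

theorem pvXd_dead (w : List Char) :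
    (let w' := PySem.Chars.lower w;
     if PySem.Chars.slice w' (some (-2)) none = ['x', 'D'] then
       PySem.Chars.slice w' none (some (-2))
     else w') = PySem.Chars.lower w := by
  simp only
  rw [if_neg]
  intro he
  rw [PySem.Chars.slice_eq_listSlice, PySem.List.slice_from_neg_ofNat _ 2 (by omega)] at he
  have hD : 'D' ∈ PySem.Chars.lower w := by
    have : 'D' ∈ List.drop ((PySem.Chars.lower w).length - 2) (PySem.Chars.lower w) := by
      rw [he]; simp
    exact List.mem_of_mem_drop this
  rw [PySem.Chars.lower] at hD
  obtain ⟨c, _, hc⟩ := List.mem_map.mp hD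
  exact pvLowerChar_ne_D c hc

-- split₀.go equations
theorem pvGo_nil (cur : List Char) (acc : List (List Char)) :
    PySem.Chars.split₀.go [] cur acc =
      if cur.isEmpty then acc.reverse else (cur.reverse :: acc).reverse := by
  simp [PySem.Chars.split₀.go]

theorem pvGo_space (c : Char) (s cur : List Char) (acc : List (List Char))
    (h : PySem.Chars.isspace c = true) :
    PySem.Chars.split₀.go (c :: s) cur acc =
      if cur.isEmpty then PySem.Chars.split₀.go s [] acc
      else PySem.Chars.split₀.go s [] (cur.reverse :: acc) := by
  simp [PySem.Chars.split₀.go, h]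

theorem pvGo_char (c : Char) (s cur : List Char) (acc : List (List Char))
    (h : PySem.Chars.isspace c = false) :
    PySem.Chars.split₀.go (c :: s) cur acc = PySem.Chars.split₀.go s (c :: cur) acc := by
  simp [PySem.Chars.split₀.go, h]

-- scanning a space-free block just accumulates it
theorem pvGo_block (w : List Char) (hw : ∀ c ∈ w, PySem.Chars.isspace c = false)
    (rest cur : List Char) (acc : List (List Char)) :
    PySem.Chars.split₀.go (w ++ rest) cur acc =
      PySem.Chars.split₀.go rest (w.reverse ++ cur) acc := by
  induction w generalizing cur with
  | nil => simp
  | cons c t ih =>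
    rw [List.cons_append, pvGo_char c _ cur acc (hw c (by simp)),
        ih (fun c hc => hw c (by simp [hc])) (c :: cur)]
    simp

-- splitting a " "-join of space-free pieces recovers the nonempty pieces
theorem pvGo_join (cs : List (List Char)) (hcs : ∀ w ∈ cs, ∀ c ∈ w, PySem.Chars.isspace c = false)
    (acc : List (List Char)) :
    PySem.Chars.split₀.go (PySem.Chars.join [' '] cs) [] acc =
      acc.reverse ++ cs.filter (· ≠ []) := by
  induction cs generalizing acc with
  | nil => simp [PySem.Chars.join, List.intercalate, pvGo_nil]
  | cons w rest ih =>
    have hw : ∀ c ∈ w, PySem.Chars.isspace c = false := hcs w (by simp)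
    have hrest : ∀ v ∈ rest, ∀ c ∈ v, PySem.Chars.isspace c = false :=
      fun v hv => hcs v (by simp [hv])
    cases rest with
    | nil =>
      have hjoin : PySem.Chars.join [' '] [w] = w := by
        simp [PySem.Chars.join, List.intercalate]
      have hb := pvGo_block w hw [] [] acc
      rw [List.append_nil] at hb
      rw [hjoin, hb, pvGo_nil]
      by_cases hwe : w = []
      · simp [hwe]
      · simp [hwe, List.isEmpty_iff, List.reverse_reverse]
    | cons v rest' =>
      rw [PySem.Chars.join_cons_cons, List.append_assoc, pvGo_block w hw _ [] acc]
      rw [List.singleton_append, pvGo_space ' ' _ _ _ (by decide)]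
      by_cases hwe : w = []
      · simp only [hwe, List.reverse_nil, List.append_nil, List.isEmpty_nil, if_true]
        rw [ih hrest acc]
        simp [List.filter_cons]
      · rw [if_neg (by simp [List.isEmpty_iff, hwe])]
        rw [ih hrest]
        simp [List.filter_cons, hwe]

theorem pvSplit_join (cs : List (List Char))
    (hcs : ∀ w ∈ cs, ∀ c ∈ w, PySem.Chars.isspace c = false) :
    PySem.Chars.split₀ (PySem.Chars.join [' '] cs) = cs.filter (· ≠ []) := by
  rw [PySem.Chars.split₀, pvGo_join cs hcs []]; rfl

theorem pvGo_nospace (s : List Char) : ∀ (cur : List Char) (acc : List (List Char)),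
    (∀ c ∈ cur, PySem.Chars.isspace c = false) →
    (∀ w ∈ acc, ∀ c ∈ w, PySem.Chars.isspace c = false) →
    ∀ w ∈ PySem.Chars.split₀.go s cur acc, ∀ c ∈ w, PySem.Chars.isspace c = false := by
  induction s with
  | nil =>
    intro cur acc hcur hacc w hw
    rw [pvGo_nil] at hw
    split at hw
    · exact hacc w (by simpa using hw)
    · have h : w ∈ cur.reverse :: acc := List.mem_reverse.mp hw
      rcases List.mem_cons.mp h with h1 | h2
      · subst h1; intro c hc; exact hcur c (List.mem_reverse.mp hc)
      · exact hacc w h2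
  | cons c t ih =>
    intro cur acc hcur hacc w hw
    by_cases hsp : PySem.Chars.isspace c = true
    · rw [pvGo_space _ _ _ _ hsp] at hw
      split at hw
      · exact ih [] acc (by simp) hacc w hw
      · refine ih [] (cur.reverse :: acc) (by simp) ?_ w hw
        intro v hv
        rcases List.mem_cons.mp hv with h1 | h2
        · subst h1; intro d hd; exact hcur d (List.mem_reverse.mp hd)
        · exact hacc v h2
    · rw [pvGo_char _ _ _ _ (by simpa using hsp)] at hw
      refine ih (c :: cur) acc ?_ hacc w hw
      intro d hd
      rcases List.mem_cons.mp hd with h1 | h2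
      · subst h1; simpa using hsp
      · exact hcur d h2

-- words produced by split() contain no whitespace
theorem pvSplit_nospace (s : List Char) :
    ∀ w ∈ PySem.Chars.split₀ s, ∀ c ∈ w, PySem.Chars.isspace c = false :=
  pvGo_nospace s [] [] (by simp) (by simp)

theorem pvLowerChar_nospace (c : Char) (h : PySem.Chars.isspace c = false) :
    PySem.Chars.isspace (PySem.Chars.lowerChar c) = false := by
  by_cases hu : PySem.Chars.isupper c = true
  · have hr := pvUpper_range c hu
    have ht := pvLowerChar_toNat c hu
    simp only [PySem.Chars.isspace, ht]
    simp only [Bool.or_eq_false_iff, Bool.and_eq_false_iff, decide_eq_false_iff_not]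
    omega
  · rw [PySem.Chars.lowerChar, if_neg hu]; exact h

-- filtering with a space-keeping predicate commutes with " "-join
theorem pvFilter_join (p : Char → Bool) (hp : p ' ' = true) (cs : List (List Char)) :
    (PySem.Chars.join [' '] cs).filter p = PySem.Chars.join [' '] (cs.map (·.filter p)) := by
  induction cs with
  | nil => simp [PySem.Chars.join, List.intercalate]
  | cons w rest ih =>
    cases rest with
    | nil => simp [PySem.Chars.join, List.intercalate]
    | cons v rest' =>
      rw [PySem.Chars.join_cons_cons, List.filter_append, List.filter_append, ih]
      conv_rhs => rw [List.map_cons, List.map_cons, PySem.Chars.join_cons_cons, ← List.map_cons]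
      simp [hp]

-- collapsing double spaces never changes split()
theorem pvGo_pvRS (l : List Char) : ∀ (cur : List Char) (acc : List (List Char)),
    PySem.Chars.split₀.go (pvRS l) cur acc = PySem.Chars.split₀.go l cur acc := by
  induction l using pvRS.induct with
  | case1 => intro cur acc; simp [pvRS]
  | case2 c t hp ih =>
    intro cur acc
    have hpre : [' ', ' '] <+: (c :: t) := by rwa [← List.isPrefixOf_iff_prefix]
    obtain ⟨t'', ht⟩ := hpre
    have hh : ' ' :: (' ' :: t'') = c :: t := ht
    injection hh with h1 h2
    subst h2
    subst h1
    rw [pvRS, if_pos hp]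
    simp only [List.drop_succ_cons, List.drop_zero] at ih ⊢
    have hsp : PySem.Chars.isspace ' ' = true := by decide
    rw [pvGo_space _ _ _ _ hsp, pvGo_space _ _ _ _ hsp]
    by_cases hc : cur.isEmpty
    · rw [if_pos hc, if_pos hc, ih, pvGo_space _ _ _ _ hsp, if_pos (by decide)]
    · rw [if_neg hc, if_neg hc, ih, pvGo_space _ _ _ _ hsp, if_pos (by decide)]
  | case3 c t hp ih =>
    intro cur acc
    rw [pvRS, if_neg hp]
    by_cases hc : PySem.Chars.isspace c = true
    · rw [pvGo_space _ _ _ _ hc, pvGo_space _ _ _ _ hc]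
      by_cases he : cur.isEmpty
      · rw [if_pos he, if_pos he, ih]
      · rw [if_neg he, if_neg he, ih]
    · rw [pvGo_char _ _ _ _ (by simpa using hc), pvGo_char _ _ _ _ (by simpa using hc), ih]

theorem pvSplit_collapse (s : List Char) :
    PySem.Chars.split₀ (pvCollapse s) = PySem.Chars.split₀ s := by
  induction s using pvCollapse.induct with
  | case1 s h ih =>
    rw [pvCollapse, dif_pos h]
    rw [ih, pvReplace_eq_pvRS, PySem.Chars.split₀, PySem.Chars.split₀, pvGo_pvRS]
  | case2 s h =>
    rw [pvCollapse, dif_neg h]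

-- the per-document functions agree
theorem pvDoc_eq (wtr : List (List Char)) (dutch : Bool) (doc : List Char) :
    pvDocA wtr dutch doc = pvDocB wtr (if dutch then pvSufDutch else pvSufEnglish) doc := by
  simp only [pvDocA, pvDocB]
  rw [PySem.List.foldl_append_singleton_eq_map, List.nil_append,
    List.map_congr_left (fun w _ => pvXd_dead w),
    List.filter_filter,
    List.filter_congr (fun c _ => Bool.and_comm (!(PySem.Chars.isdigit c)) (!(pvPunct.contains c))),
    pvFilter_join _ (by decide), List.map_map]
  have hsf : ∀ w ∈ (PySem.Chars.split₀ (pvAccents doc)).map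
      ((fun x => List.filter (fun c => !pvPunct.contains c && !PySem.Chars.isdigit c) x) ∘ PySem.Chars.lower),
      ∀ c ∈ w, PySem.Chars.isspace c = false := by
    intro w hw c hc
    obtain ⟨t, ht, rfl⟩ := List.mem_map.mp hw
    have hcl : c ∈ PySem.Chars.lower t := List.mem_of_mem_filter hc
    obtain ⟨c₀, hc₀, rfl⟩ := List.mem_map.mp hcl
    exact pvLowerChar_nospace c₀ (pvSplit_nospace _ t ht c₀ hc₀)
  rw [pvSplit_collapse, pvSplit_join _ hsf]
  rw [show ((PySem.Chars.split₀ (pvAccents doc)).map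
      ((fun x => List.filter (fun c => !pvPunct.contains c && !PySem.Chars.isdigit c) x) ∘ PySem.Chars.lower)).filter (· ≠ []) =
    (((PySem.Chars.split₀ (pvAccents doc)).map pvCleanToken).filter (fun w => !w.isEmpty)) from
    List.filter_congr (fun w _ => by cases w <;> simp)]
  cases dutch <;> rfl

-- ===== VERDICT (by name: the statement is the Claim_ definition above) =====
theorem clean_documents_spec : Claim_equal_clean_documents := by
  intro corpus words_to_remove dutch _
  unfold Spec_clean_documents clean_documents clean_documents_alt
  exact List.map_congr_left fun s _ => congrArg String.ofList (pvDoc_eq _ dutch s.toList)
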